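-- pv_equiv track=rewrite | github.com/alejoriosm04/university-repository | second-semester/Data-structure-and-algorithms-I/workshops/seguimiento-1/simulacro-entrevista-1/ejercicio.py | sumaGrupos
-- ===== SOURCE A (Python) =====
-- def sumaGrupos(start, nums : list, k :int) -> bool:
--     if k == 0:
--         return True
--     elif start == len(nums):
--         return False
--
--     if start != len(nums)-1:
--         return sumaGrupos(start+2, nums, k-nums[start]) or sumaGrupos(start+1, nums, k)
--     else:
--         return sumaGrupos(start+1, nums, k) or sumaGrupos(start+1, nums, k-nums[start])
-- ===== SOURCE B (Python) =====
-- def sumaGrupos(start, nums: list, k: int) -> bool: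
--     # Iterative bottom-up subset-sum DP over the suffix nums[start:]:
--     # cur = set of sums of non-adjacent picks from suffix i, nxt = from suffix i+1.
--     if k == 0:
--         return True
--     cur, nxt = {0}, {0}
--     for x in reversed(nums[start:]):
--         cur, nxt = cur | {x + s for s in nxt}, cur
--     return k in cur
-- ===== Notes on version B (the rewrite author's own statement) =====
-- stated objective: alternative
-- what changed: Replaced A's branching top-down recursion (try pick / skip at each index) by an iterative bottom-up DP that sweeps the suffix once from the right, maintaining the two sets of achievable non-adjacent-pick sums, and finally tests k for membership.
-- outside the precondition, e.g. on sumaGrupos(-2, [1, 2], 3): A returns True, B returns False; on sumaGrupos(3, [5], 7): A raises IndexError, B returns False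
import Mathlib
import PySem

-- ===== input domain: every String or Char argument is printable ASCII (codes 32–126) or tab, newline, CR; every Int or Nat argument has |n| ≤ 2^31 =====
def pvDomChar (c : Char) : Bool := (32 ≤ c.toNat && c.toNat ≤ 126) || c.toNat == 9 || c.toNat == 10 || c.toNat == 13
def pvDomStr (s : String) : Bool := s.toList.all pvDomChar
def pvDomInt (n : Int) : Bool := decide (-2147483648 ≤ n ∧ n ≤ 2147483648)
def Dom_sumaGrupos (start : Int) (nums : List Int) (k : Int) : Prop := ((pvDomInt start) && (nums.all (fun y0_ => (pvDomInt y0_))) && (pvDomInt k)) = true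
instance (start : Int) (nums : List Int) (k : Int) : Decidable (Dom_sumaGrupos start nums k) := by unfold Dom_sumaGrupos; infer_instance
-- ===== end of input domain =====

-- B replaces A's pick/skip recursion by one right-to-left sweep keeping the sets of
-- achievable non-adjacent-pick sums; same Boolean answer on Pre_.

-- ===== PORT A =====
def sumaGrupos (start : Int) (nums : List Int) (k : Int) : Bool :=
  if k = 0 then true
  else if start = (nums.length : Int) then false
  else if start ≠ (nums.length : Int) - 1 then
    -- Python evaluates nums[start] before the first recursive call; none = IndexError (outside Pre_)
    match hA : PySem.List.pyGet? nums start with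
    | none => false
    | some v => sumaGrupos (start + 2) nums (k - v) || sumaGrupos (start + 1) nums k
  else
    sumaGrupos (start + 1) nums k ||
      (match PySem.List.pyGet? nums start with
       | none => false   -- IndexError, only reachable outside Pre_
       | some v => sumaGrupos (start + 1) nums (k - v))
termination_by (nums.length + 1 - start).toNat
decreasing_by
  · have hin : PySem.Raise.InRange nums.length start := by
      by_contra hc
      rw [(PySem.List.pyGet?_eq_none_iff nums start).mpr hc] at hA
      simp at hA
    unfold PySem.Raise.InRange at hin
    omega
  · have hin : PySem.Raise.InRange nums.length start := by
      by_contra hc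
      rw [(PySem.List.pyGet?_eq_none_iff nums start).mpr hc] at hA
      simp at hA
    unfold PySem.Raise.InRange at hin
    omega
  · omega
  · omega

-- ===== PORT B =====
-- one loop step: cur, nxt = cur | {x + s for s in nxt}, cur
def altStep (acc : PySem.Set Int × PySem.Set Int) (x : Int) : PySem.Set Int × PySem.Set Int :=
  (PySem.Set.union acc.1 (acc.2.map (fun s => x + s)), acc.1)

def sumaGrupos_alt (start : Int) (nums : List Int) (k : Int) : Bool :=
  if k = 0 then true
  else
    -- for x in reversed(nums[start:]): …  then  k in cur
    PySem.Set.contains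
      (((PySem.List.slice nums (some start) none).reverse).foldl altStep
        (PySem.Set.ofList [0], PySem.Set.ofList [0])).1 k

-- ===== PRECONDITION & SPEC =====
-- Pre_ restricts start to the natural domain [0, len(nums)] (except that k == 0 answers True for
-- any start, as both programs do): for start > len or start < -len A raises IndexError when k ≠ 0,
-- and for -len ≤ start < 0 A's value rests on Python negative-index wraparound (the same element
-- can be picked twice), outside the task's natural domain; B does the natural thing there.
def Pre_sumaGrupos (start : Int) (nums : List Int) (k : Int) : Prop :=
  (0 ≤ start ∧ start ≤ nums.length) ∨ k = 0
instance (start : Int) (nums : List Int) (k : Int) : Decidable (Pre_sumaGrupos start nums k) := by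
  unfold Pre_sumaGrupos; infer_instance

def pvWitness_sumaGrupos : Int × List Int × Int := (0, [1, 2, 3], 4)

def Spec_sumaGrupos (start : Int) (nums : List Int) (k : Int) (out : Bool) : Prop := out = sumaGrupos_alt start nums k
instance (start : Int) (nums : List Int) (k : Int) (out : Bool) : Decidable (Spec_sumaGrupos start nums k out) := by unfold Spec_sumaGrupos; infer_instance

-- ===== CLAIM (what is proved, stated in full; the proofs are below) =====
def Claim_equal_sumaGrupos : Prop := ∀ (start : Int) (nums : List Int) (k : Int), Dom_sumaGrupos start nums k → Pre_sumaGrupos start nums k → Spec_sumaGrupos start nums k (sumaGrupos start nums k)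

-- ===== LEMMAS AND PROOFS =====

-- the DP state after sweeping suffix l (proof-side name for B's fold)
def pvDP (l : List Int) : PySem.Set Int × PySem.Set Int :=
  l.reverse.foldl altStep (PySem.Set.ofList [0], PySem.Set.ofList [0])

theorem pvDP_nil : pvDP [] = (PySem.Set.ofList [0], PySem.Set.ofList [0]) := rfl

theorem pvDP_cons (x : Int) (l : List Int) : pvDP (x :: l) = altStep (pvDP l) x := by
  unfold pvDP
  rw [List.reverse_cons, List.foldl_append]
  rfl

theorem mem_pvDP_fst (x k : Int) (l : List Int) :
    k ∈ (pvDP (x :: l)).1 ↔ k ∈ (pvDP l).1 ∨ (k - x) ∈ (pvDP l).2 := by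
  rw [pvDP_cons]
  unfold altStep
  rw [PySem.Set.mem_union]
  constructor
  · rintro (h | h)
    · exact Or.inl h
    · rcases List.mem_map.mp h with ⟨s, hs, rfl⟩
      right; simpa using hs
  · rintro (h | h)
    · exact Or.inl h
    · right; exact List.mem_map.mpr ⟨k - x, h, by ring⟩

theorem snd_pvDP_cons (x : Int) (l : List Int) : (pvDP (x :: l)).2 = (pvDP l).1 := by
  rw [pvDP_cons]; rfl

theorem zero_mem_pvDP_fst (l : List Int) : (0 : Int) ∈ (pvDP l).1 := by
  induction l with
  | nil => simp [pvDP_nil]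
  | cons x l ih =>
    rw [pvDP_cons]
    unfold altStep
    exact (PySem.Set.mem_union _ _ _).mpr (Or.inl ih)

-- the key bridge: A's recursion computes membership of k in the first DP set of the suffix
theorem sumaGrupos_eq_mem (nums : List Int) :
    ∀ (n : Nat) (start k : Int), 0 ≤ start → start ≤ nums.length →
      ((nums.length : Int) - start).toNat ≤ n →
      sumaGrupos start nums k = PySem.Set.contains (pvDP (nums.drop start.toNat)).1 k := by
  intro n
  induction n with
  | zero =>
    intro start k h0 h1 hn
    have hs : start = (nums.length : Int) := by omega
    have hdrop : nums.drop start.toNat = [] := List.drop_eq_nil_of_le (by omega)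
    rw [sumaGrupos, hdrop, pvDP_nil, Bool.eq_iff_iff]
    by_cases hk : k = 0
    · simp [hk, PySem.Set.mem_ofList]
    · simp [hk, hs, PySem.Set.mem_ofList]
  | succ n ih =>
    intro start k h0 h1 hn
    by_cases hk : k = 0
    · subst hk
      rw [sumaGrupos]
      exact ((PySem.Set.contains_iff _ _).mpr (zero_mem_pvDP_fst _)).symm
    · by_cases hend : start = (nums.length : Int)
      · have hdrop : nums.drop start.toNat = [] := List.drop_eq_nil_of_le (by omega)
        rw [sumaGrupos, hdrop, pvDP_nil, Bool.eq_iff_iff]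
        simp [hk, hend, PySem.Set.mem_ofList]
      · have hlt : start < nums.length := by omega
        have hidx : start.toNat < nums.length := by omega
        have hget : PySem.List.pyGet? nums start = some (nums[start.toNat]'hidx) :=
          PySem.List.pyGet?_eq_some_getElem nums h0 (by omega)
        have hdrop1 : nums.drop start.toNat = (nums[start.toNat]'hidx) :: nums.drop (start.toNat + 1) :=
          List.drop_eq_getElem_cons hidx
        by_cases hlast : start = (nums.length : Int) - 1
        · -- last element of the suffix: drop start = [x]
          have hdrop2 : nums.drop (start.toNat + 1) = [] := List.drop_eq_nil_of_le (by omega)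
          have ih1 := ih (start + 1) k (by omega) (by omega) (by omega)
          have ih2 := ih (start + 1) (k - (nums[start.toNat]'hidx)) (by omega) (by omega) (by omega)
          have hts : (start + 1).toNat = start.toNat + 1 := by omega
          rw [sumaGrupos]
          simp only [if_neg hk, if_neg hend, if_neg (show ¬ start ≠ (nums.length : Int) - 1 from by omega), hget]
          rw [ih1, ih2, hts, hdrop2, hdrop1, hdrop2, pvDP_nil, Bool.eq_iff_iff]
          simp only [Bool.or_eq_true, PySem.Set.contains_iff, mem_pvDP_fst, pvDP_nil,
            PySem.Set.mem_ofList, List.mem_singleton]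
        · -- interior: drop start = x :: y :: l'
          have hidx2 : start.toNat + 1 < nums.length := by omega
          have hdrop2 : nums.drop (start.toNat + 1) =
              (nums[start.toNat + 1]'hidx2) :: nums.drop (start.toNat + 2) :=
            List.drop_eq_getElem_cons hidx2
          have ih1 := ih (start + 2) (k - (nums[start.toNat]'hidx)) (by omega) (by omega) (by omega)
          have ih2 := ih (start + 1) k (by omega) (by omega) (by omega)
          have hts1 : (start + 1).toNat = start.toNat + 1 := by omega
          have hts2 : (start + 2).toNat = start.toNat + 2 := by omega
          rw [sumaGrupos]
          simp only [if_neg hk, if_neg hend, if_pos (show start ≠ (nums.length : Int) - 1 from hlast)]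
          split
          · next heq => rw [hget] at heq; simp at heq
          next v heq =>
          rw [hget] at heq
          injection heq with hv
          subst hv
          rw [ih1, ih2, hts1, hts2, hdrop1, hdrop2, Bool.eq_iff_iff]
          simp only [Bool.or_eq_true, PySem.Set.contains_iff, mem_pvDP_fst, snd_pvDP_cons]
          tauto

-- ===== VERDICT (by name: the statement is the Claim_ definition above) =====
theorem sumaGrupos_spec : Claim_equal_sumaGrupos := by
  intro start nums k _ hpre
  unfold Spec_sumaGrupos sumaGrupos_alt
  by_cases hk : k = 0
  · rw [sumaGrupos]
    simp [hk]
  · rcases hpre with ⟨h0, h1⟩ | h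
    · rw [if_neg hk, PySem.List.slice_from nums h0]
      exact sumaGrupos_eq_mem nums ((nums.length : Int) - start).toNat start k h0 h1 le_rfl
    · exact absurd h hk
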